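-- pv_equiv track=rewrite | github.com/e0406370/reetkode | python/lce_p1180_count_substrings_with_only_one_distinct_letter.py | countLettersAlt
-- ===== SOURCE A (Python) =====
-- def countLettersAlt(s: str) -> int:
--     n = len(s)
--     total = 1
--     curr = 1
--
--     for i in range(1, n):
--         if s[i] == s[i - 1]:
--             curr += 1
--         else:
--             curr = 1
--
--         total += curr
--
--     return total
-- ===== SOURCE B (Python) =====
-- from itertools import groupby
--
--
-- def countLettersAlt(s: str) -> int:
--     return sum(k * (k + 1) // 2 for k in (sum(1 for _ in g) for _, g in groupby(s)))
-- ===== Notes on version B (the rewrite author's own statement) =====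
-- stated objective: idiomatic
-- what changed: B collects maximal runs of equal letters with itertools.groupby and returns the closed-form sum k*(k+1)//2 over run lengths, instead of A's index loop with an incremental run counter.
-- intended difference: On the empty string A returns 1 (its accumulator starts at 1 before the loop), while B returns 0, the correct number of one-distinct-letter substrings of an empty string. — e.g. on countLettersAlt(""): A returns 1, B returns 0
import Mathlib
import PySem

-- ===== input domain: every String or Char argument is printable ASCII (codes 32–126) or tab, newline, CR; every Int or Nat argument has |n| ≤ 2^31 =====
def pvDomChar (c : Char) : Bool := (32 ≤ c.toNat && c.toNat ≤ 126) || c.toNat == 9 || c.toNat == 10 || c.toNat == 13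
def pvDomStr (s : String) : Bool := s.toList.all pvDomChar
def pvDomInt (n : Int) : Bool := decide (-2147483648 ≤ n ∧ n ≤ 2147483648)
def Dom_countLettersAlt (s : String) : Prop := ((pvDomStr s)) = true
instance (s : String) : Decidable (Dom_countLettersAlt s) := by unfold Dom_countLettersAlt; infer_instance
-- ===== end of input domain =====

-- B groups the string into maximal runs of equal letters and sums k*(k+1)/2 over the run
-- lengths (objective: idiomatic); A and B differ only on the empty string (see D_ below).

-- ===== PORT A =====
-- A's loop 'for i in range(1, n)' as structural recursion on the number of remaining
-- iterations (fuel = n - i, a totality counter only), carrying A's exact state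
-- (total, curr) and reading s[i]/s[i-1] (always in range here) with getD.
def countLettersAltLoop (cs : List Char) (total curr : Int) (i : Nat) : Nat → Int
  | 0 => total
  | fuel + 1 =>
    let curr' := if cs.getD i ' ' == cs.getD (i - 1) ' ' then curr + 1 else 1
    countLettersAltLoop cs (total + curr') curr' (i + 1) fuel

def countLettersAlt (s : String) : Int :=
  countLettersAltLoop s.toList 1 1 1 (s.toList.length - 1)

-- ===== PORT B =====
-- itertools.groupby(s): the lengths of the maximal blocks of equal characters.
def countLettersAltRuns (c : Char) (k : Nat) : List Char → List Nat
  | [] => [k]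
  | d :: rest => if d == c then countLettersAltRuns c (k + 1) rest
                 else k :: countLettersAltRuns d 1 rest

def countLettersAlt_alt (s : String) : Int :=
  match s.toList with
  | [] => 0
  | c :: rest => ((countLettersAltRuns c 1 rest).map (fun k : Nat => ((k : Int) * (k + 1)) / 2)).sum

-- ===== PRECONDITION & SPEC =====
-- On the empty string A returns 1 (its accumulator starts at 1 before the loop), while B
-- returns 0, the correct number of one-distinct-letter substrings of an empty string.
def D_countLettersAlt (s : String) : Prop := s = ""
instance (s : String) : Decidable (D_countLettersAlt s) := by unfold D_countLettersAlt; infer_instance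

def Spec_countLettersAlt (s : String) (out : Int) : Prop := ¬ D_countLettersAlt s → out = countLettersAlt_alt s
instance (s : String) (out : Int) : Decidable (Spec_countLettersAlt s out) := by unfold Spec_countLettersAlt; infer_instance

def pvDiffWitness_countLettersAlt : String := ""
def pvDiffWitnessOut_countLettersAlt : Int × Int := (1, 0)

-- ===== CLAIM (what is proved, stated in full; the proofs are below) =====
def Claim_unchanged_countLettersAlt : Prop := ∀ (s : String), Dom_countLettersAlt s → Spec_countLettersAlt s (countLettersAlt s)
def Claim_changed_countLettersAlt : Prop := Dom_countLettersAlt (pvDiffWitness_countLettersAlt) ∧ D_countLettersAlt (pvDiffWitness_countLettersAlt) ∧ countLettersAlt (pvDiffWitness_countLettersAlt) = pvDiffWitnessOut_countLettersAlt.1 ∧ countLettersAlt_alt (pvDiffWitness_countLettersAlt) = pvDiffWitnessOut_countLettersAlt.2 ∧ pvDiffWitnessOut_countLettersAlt.1 ≠ pvDiffWitnessOut_countLettersAlt.2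
def Claim_exact_countLettersAlt : Prop := ∀ (s : String), Dom_countLettersAlt s → D_countLettersAlt s → countLettersAlt s ≠ countLettersAlt_alt s

-- ===== LEMMAS AND PROOFS =====

-- the triangular number as B computes it
def pvTri (k : Nat) : Int := ((k : Int) * (k + 1)) / 2

lemma pvTri_succ (k : Nat) : pvTri (k + 1) = pvTri k + (k + 1) := by
  unfold pvTri
  push_cast
  rw [show ((k : Int) + 1) * ((k : Int) + 1 + 1) = (k : Int) * ((k : Int) + 1) + ((k : Int) + 1) * 2 by ring,
      Int.add_mul_ediv_right _ _ (by norm_num)]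

-- A's loop re-read as a recursion on the remaining suffix of the string,
-- with the run length curr kept as a Nat
def pvLoopL (prev : Char) (k : Nat) (total : Int) : List Char → Int
  | [] => total
  | d :: rest =>
    let k' := if d == prev then k + 1 else 1
    pvLoopL d k' (total + k') rest

lemma countLettersAltLoop_eq_pvLoopL (cs : List Char) :
    ∀ fuel i total (k : Nat), 1 ≤ i → fuel = cs.length - i →
      countLettersAltLoop cs total (k : Int) i fuel
        = pvLoopL (cs.getD (i - 1) ' ') k total (cs.drop i) := by
  intro fuel
  induction fuel with
  | zero =>
    intro i total k _ hf
    rw [countLettersAltLoop, List.drop_of_length_le (by omega), pvLoopL]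
  | succ f ih =>
    intro i total k hi hf
    have h : i < cs.length := by omega
    have hdrop : cs.drop i = cs[i] :: cs.drop (i + 1) := List.drop_eq_getElem_cons h
    have hgd : cs.getD i ' ' = cs[i] := List.getD_eq_getElem cs ' ' h
    rw [countLettersAltLoop, hdrop, pvLoopL, hgd]
    by_cases hb : (cs[i] == cs.getD (i - 1) ' ') = true
    · have := ih (i + 1) (total + ((k + 1 : Nat) : Int)) (k + 1) (by omega) (by omega)
      rw [Nat.add_sub_cancel, hgd] at this
      simp only [hb, if_pos]
      push_cast at this ⊢
      exact this
    · have := ih (i + 1) (total + ((1 : Nat) : Int)) 1 (by omega) (by omega)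
      rw [Nat.add_sub_cancel, hgd] at this
      simp only [Bool.not_eq_true] at hb
      simp only [hb, Bool.false_eq_true, if_false]
      push_cast at this ⊢
      exact this

lemma pvLoopL_eq_triSum (cs : List Char) :
    ∀ prev (k : Nat) total,
      pvLoopL prev k total cs
        = total + ((countLettersAltRuns prev k cs).map pvTri).sum - pvTri k := by
  induction cs with
  | nil => intro prev k total; simp [pvLoopL, countLettersAltRuns]
  | cons d rest ih =>
    intro prev k total
    rw [pvLoopL, countLettersAltRuns]
    by_cases hb : (d == prev) = true
    · have hd : d = prev := by simpa using hb
      subst hd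
      simp only [hb, if_pos]
      rw [ih d (k + 1) (total + ((k + 1 : Nat) : Int))]
      have := pvTri_succ k
      push_cast
      omega
    · simp only [Bool.not_eq_true] at hb
      simp only [hb, Bool.false_eq_true, if_false]
      rw [ih d 1 (total + ((1 : Nat) : Int))]
      have h1 : pvTri 1 = 1 := by decide
      simp only [List.map_cons, List.sum_cons, h1]
      push_cast
      omega

-- ===== VERDICT (by name: the statement is the Claim_ definition above) =====
theorem countLettersAlt_spec : Claim_unchanged_countLettersAlt := by
  intro s _ hD
  unfold countLettersAlt countLettersAlt_alt
  cases hcs : s.toList with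
  | nil => exact absurd (String.toList_eq_nil_iff.mp hcs) hD
  | cons c rest =>
    dsimp only
    have := countLettersAltLoop_eq_pvLoopL (c :: rest) ((c :: rest).length - 1) 1 1 1
      (by omega) rfl
    rw [show ((1 : Nat) : Int) = 1 by norm_num] at this
    rw [this]
    simp only [List.drop_one, List.tail_cons, Nat.sub_self, List.getD_cons_zero]
    rw [pvLoopL_eq_triSum]
    have h1 : pvTri 1 = 1 := by decide
    rw [h1, show (fun k : Nat => ((k : Int) * (k + 1)) / 2) = pvTri from rfl]
    omega

theorem countLettersAlt_changed : Claim_changed_countLettersAlt := by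
  unfold Claim_changed_countLettersAlt; decide

theorem countLettersAlt_tight : Claim_exact_countLettersAlt := by
  intro s _ hD
  unfold D_countLettersAlt at hD
  subst hD
  decide
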